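-- pv_equiv track=rewrite | github.com/miliar/Code_Jam_Webscraper | solutions_python/solutions_year17_round0_nr3/1727.py | placePerson
-- ===== SOURCE A (Python) =====
-- def placePerson(stallArray):
--     emptiesPos = 0
--     emptiesLength = 0
--     tempPos = 0
--     tempLength = 0
--     startCounting = True
--
--     for i in range(0, len(stallArray)):
--         if (stallArray[i] == False) & (startCounting == True):
--             tempPos = i
--             tempLength += 1
--             startCounting = False
--         elif (stallArray[i] == False) & (startCounting == False):
--             tempLength += 1
--         elif (stallArray[i] == True):
--             startCounting = True
--             if (emptiesLength < tempLength):
--                 emptiesPos = tempPos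
--                 emptiesLength = tempLength
--             tempLength = 0;
--         if (stallArray[i] == False) & (i == len(stallArray)-1):
--             if (emptiesLength < tempLength):
--                 emptiesPos = tempPos
--                 emptiesLength = tempLength
--
--     if (emptiesLength == 1):
--         stallArray[emptiesPos] = True
--         return emptiesPos
--     elif (emptiesLength % 2 == 0):
--         stallArray[emptiesPos + int(emptiesLength / 2) - 1] = True
--         return emptiesPos + int(emptiesLength / 2) - 1
--     elif (emptiesLength % 2 == 1):
--         stallArray[emptiesPos + int(emptiesLength / 2)] = True
--         return emptiesPos + int(emptiesLength / 2)
-- ===== SOURCE B (Python) =====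
-- def placePerson(stallArray):
--     # collect maximal runs of empty stalls as (start, length) pairs
--     runs = []
--     start = None
--     for i, s in enumerate(stallArray):
--         if s == False:
--             if start is None:
--                 start = i
--         else:
--             if start is not None:
--                 runs.append((start, i - start))
--                 start = None
--     if start is not None:
--         runs.append((start, len(stallArray) - start))
--     # first run of maximum length (default start 0, length 0)
--     best = (0, 0)
--     for r in runs:
--         if r[1] > best[1]:
--             best = r
--     pos, length = best
--     idx = pos + length // 2 - (1 if length % 2 == 0 else 0)
--     stallArray[idx] = True
--     return idx
-- ===== Notes on version B (the rewrite author's own statement) =====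
-- stated objective: simpler
-- what changed: A tracks a five-variable state machine (best run, open run, counting flag, plus a duplicated merge at the last index) in one index loop; B decomposes the task into collecting the maximal runs of empty stalls as (start, length) pairs, picking the first longest run, and applying a single midpoint formula.
-- outside the precondition, e.g. on placePerson([]): A raises IndexError, B raises IndexError
import Mathlib
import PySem

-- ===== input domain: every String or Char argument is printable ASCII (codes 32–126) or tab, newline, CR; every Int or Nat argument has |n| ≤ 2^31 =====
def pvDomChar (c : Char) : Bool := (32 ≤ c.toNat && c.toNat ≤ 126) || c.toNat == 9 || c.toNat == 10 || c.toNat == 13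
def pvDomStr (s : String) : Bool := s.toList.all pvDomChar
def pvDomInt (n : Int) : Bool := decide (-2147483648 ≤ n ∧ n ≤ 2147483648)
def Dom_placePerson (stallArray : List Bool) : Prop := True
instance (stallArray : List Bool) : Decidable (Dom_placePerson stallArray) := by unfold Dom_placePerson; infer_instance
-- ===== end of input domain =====

-- B replaces A's five-variable single-pass state machine by a plain decomposition: collect
-- the maximal runs of empty stalls, pick the first longest, apply the midpoint formula
-- (objective: simpler). Both Pythons also set stallArray[result] = True in place (the same
-- mutation); the equivalence proved here is about the RETURN value.

-- ===== PORT A =====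
-- loop body of A's for-loop (the elif chain, then the extra last-index merge), named for readability
def placePersonStep (n : Int) (st : Int × Int × Int × Int × Bool) (i : Int) (v : Bool) :
    Int × Int × Int × Int × Bool :=
  match st with
  | (eP, eL, tP, tL, sc) =>
    let st' :=
      if (v == false) && (sc == true) then (eP, eL, i, tL + 1, false)
      else if (v == false) && (sc == false) then (eP, eL, tP, tL + 1, sc)
      else if v == true then
        (if eL < tL then (tP, tL, tP, (0 : Int), true) else (eP, eL, tP, (0 : Int), true))
      else (eP, eL, tP, tL, sc)
    match st' with
    | (eP, eL, tP, tL, sc) =>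
      if (v == false) && (i == n - 1) then
        (if eL < tL then (tP, tL, tP, tL, sc) else (eP, eL, tP, tL, sc))
      else (eP, eL, tP, tL, sc)

def placePerson (stallArray : List Bool) : Int :=
  let n : Int := stallArray.length
  let s := (PySem.List.pyRange 0 n 1).foldl
    (fun st i => placePersonStep n st i (PySem.List.pyGetD stallArray i false))
    (0, 0, 0, 0, true)
  match s with
  | (eP, eL, _, _, _) =>
    -- int(eL / 2) in Python = eL // 2 here: 0 ≤ eL ≤ len(stallArray), exact in float
    if eL == 1 then eP
    else if PySem.Int.mod eL 2 == 0 then eP + PySem.Int.floordiv eL 2 - 1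
    else eP + PySem.Int.floordiv eL 2   -- the elif 'eL % 2 == 1' branch: exhaustive since eL % 2 ∈ {0,1}

-- ===== PORT B =====
-- run-collector loop body of Source B
def runStep (acc : List (Int × Int) × Option Int) (p : Int × Bool) :
    List (Int × Int) × Option Int :=
  if p.2 == false then
    match acc.2 with
    | none => (acc.1, some p.1)
    | some s => (acc.1, some s)
  else
    match acc.2 with
    | none => (acc.1, none)
    | some s => (acc.1 ++ [(s, p.1 - s)], none)

-- 'if r[1] > best[1]: best = r' loop body of Source B
def bestStep (b r : Int × Int) : Int × Int := if r.2 > b.2 then r else b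

def placePerson_alt (stallArray : List Bool) : Int :=
  let p := (PySem.List.enumerate stallArray).foldl runStep ([], none)
  let runs := match p.2 with
    | none => p.1
    | some s => p.1 ++ [(s, (stallArray.length : Int) - s)]
  let best := runs.foldl bestStep ((0 : Int), (0 : Int))
  best.1 + PySem.Int.floordiv best.2 2 - (if PySem.Int.mod best.2 2 == 0 then 1 else 0)

-- ===== PRECONDITION & SPEC =====
-- Pre_ excludes only the empty list: both Pythons raise IndexError there (stallArray[-1] = True).
def Pre_placePerson (stallArray : List Bool) : Prop := stallArray ≠ []
instance (stallArray : List Bool) : Decidable (Pre_placePerson stallArray) := by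
  unfold Pre_placePerson; infer_instance

def pvWitness_placePerson : List Bool := [true, false, false, true]

def Spec_placePerson (stallArray : List Bool) (out : Int) : Prop := out = placePerson_alt stallArray
instance (stallArray : List Bool) (out : Int) : Decidable (Spec_placePerson stallArray out) := by
  unfold Spec_placePerson; infer_instance

-- ===== CLAIM (what is proved, stated in full; the proofs are below) =====
def Claim_equal_placePerson : Prop := ∀ (stallArray : List Bool), Dom_placePerson stallArray → Pre_placePerson stallArray → Spec_placePerson stallArray (placePerson stallArray)

-- ===== LEMMAS AND PROOFS =====

-- A's loop body without the last-index merge (the elif chain only)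
def stepA0 (st : Int × Int × Int × Int × Bool) (i : Int) (v : Bool) :
    Int × Int × Int × Int × Bool :=
  match st with
  | (eP, eL, tP, tL, sc) =>
    if (v == false) && (sc == true) then (eP, eL, i, tL + 1, false)
    else if (v == false) && (sc == false) then (eP, eL, tP, tL + 1, sc)
    else if v == true then
      (if eL < tL then (tP, tL, tP, (0 : Int), true) else (eP, eL, tP, (0 : Int), true))
    else (eP, eL, tP, tL, sc)

lemma enumerate_append_singleton {α : Type} (xs : List α) (x : α) (s : Int) :
    PySem.List.enumerate (xs ++ [x]) s
      = PySem.List.enumerate xs s ++ [(s + xs.length, x)] := by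
  induction xs generalizing s with
  | nil => simp [PySem.List.enumerate_nil, PySem.List.enumerate_cons]
  | cons y ys ih =>
    simp [PySem.List.enumerate_cons, ih]
    omega

lemma enumerate_fst_bound {α : Type} (xs : List α) (s : Int) (p : Int × α)
    (hp : p ∈ PySem.List.enumerate xs s) : s ≤ p.1 ∧ p.1 < s + xs.length := by
  induction xs generalizing s with
  | nil => simp [PySem.List.enumerate_nil] at hp
  | cons y ys ih =>
    rw [PySem.List.enumerate_cons, List.mem_cons] at hp
    rcases hp with h | h
    · subst h; simp only [List.length_cons]; push_cast; omega
    · have := ih (s + 1) h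
      simp only [List.length_cons]
      push_cast
      omega

-- bridge: A's index fold over range(len(xs)) with xs[i] = structural fold over enumerate(xs)
lemma foldl_pyRange_getD_enumerate {α σ : Type} (xs : List α) (d : α)
    (g : σ → Int → α → σ) (init : σ) :
    (PySem.List.pyRange 0 xs.length 1).foldl
        (fun s i => g s i (PySem.List.pyGetD xs i d)) init
      = (PySem.List.enumerate xs).foldl (fun s p => g s p.1 p.2) init := by
  induction xs using List.reverseRecOn generalizing init with
  | nil =>
    rw [show (([] : List α).length : Int) = 0 by simp, PySem.List.pyRange_one_eq_nil (le_refl 0)]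
    simp [PySem.List.enumerate_nil]
  | append_singleton ys y ih =>
    have h1 : (((ys ++ [y]).length : Nat) : Int) = (ys.length : Int) + 1 := by
      simp only [List.length_append, List.length_cons, List.length_nil]
      push_cast
      ring
    rw [h1, PySem.List.pyRange_one_succ_right (Int.natCast_nonneg ys.length),
        List.foldl_append, enumerate_append_singleton, List.foldl_append]
    simp only [List.foldl_cons, List.foldl_nil]
    rw [PySem.List.foldl_congr_mem _ _
          (fun s i => g s i (PySem.List.pyGetD ys i d)) init ?_, ih]
    · have h2 : PySem.List.pyGetD (ys ++ [y]) (ys.length : Int) d = y := by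
        rw [PySem.List.pyGetD_eq_getElem _ d (Int.natCast_nonneg ys.length) (by simp)]
        simp
      simp [h2]
    · intro acc i hi
      rw [PySem.List.mem_pyRange_one] at hi
      have hlt : i.toNat < ys.length := by omega
      have h2 : PySem.List.pyGetD ys i d = ys[i.toNat] :=
        PySem.List.pyGetD_eq_getElem ys d hi.1 (by exact_mod_cast hi.2)
      have h3 : PySem.List.pyGetD (ys ++ [y]) i d
          = (ys ++ [y])[i.toNat]'(by simp; omega) :=
        PySem.List.pyGetD_eq_getElem _ d hi.1 (by simp; omega)
      simp only [h2, h3, List.getElem_append_left hlt]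

-- B's best so far is never negative in length
lemma bestStep_snd_nonneg (rs : List (Int × Int)) (b : Int × Int) (hb : 0 ≤ b.2) :
    0 ≤ (rs.foldl bestStep b).2 := by
  induction rs generalizing b with
  | nil => simpa
  | cons r rs ih =>
    simp only [List.foldl_cons]
    apply ih
    unfold bestStep
    split <;> omega

-- pointwise values of the loop bodies
lemma stepA0_false_start (eP eL tP i : Int) :
    stepA0 (eP, eL, tP, 0, true) i false = (eP, eL, i, 1, false) := by
  simp [stepA0]

lemma stepA0_false_mid (eP eL tP tL i : Int) :
    stepA0 (eP, eL, tP, tL, false) i false = (eP, eL, tP, tL + 1, false) := by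
  simp [stepA0]

lemma stepA0_true (eP eL tP tL i : Int) (sc : Bool) :
    stepA0 (eP, eL, tP, tL, sc) i true
      = (if eL < tL then (tP, tL, tP, (0 : Int), true) else (eP, eL, tP, (0 : Int), true)) := by
  simp [stepA0]

lemma runStep_false (runs : List (Int × Int)) (st : Option Int) (i : Int) :
    runStep (runs, st) (i, false) = (runs, some (st.getD i)) := by
  cases st <;> simp [runStep]

lemma runStep_true_none (runs : List (Int × Int)) (i : Int) :
    runStep (runs, none) (i, true) = (runs, none) := by
  simp [runStep]

lemma runStep_true_some (runs : List (Int × Int)) (s i : Int) :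
    runStep (runs, some s) (i, true) = (runs ++ [(s, i - s)], none) := by
  simp [runStep]

-- the simulation invariant between A's scan state and B's (runs, open-run) accumulator
def InvAB (k : Int) (a : Int × Int × Int × Int × Bool) (b : List (Int × Int) × Option Int) : Prop :=
  match a with
  | (eP, eL, tP, tL, sc) =>
    (eP, eL) = b.1.foldl bestStep (0, 0) ∧
    (match b.2 with
     | none => sc = true ∧ tL = 0
     | some s => sc = false ∧ tP = s ∧ tL = k - s)

lemma sim (xs : List Bool) : ∀ (k : Int) (a : Int × Int × Int × Int × Bool)
    (b : List (Int × Int) × Option Int), InvAB k a b →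
    InvAB (k + (xs.length : Int))
      ((PySem.List.enumerate xs k).foldl (fun st p => stepA0 st p.1 p.2) a)
      ((PySem.List.enumerate xs k).foldl runStep b) := by
  induction xs with
  | nil =>
    intro k a b h
    simpa [PySem.List.enumerate_nil] using h
  | cons v vs ih =>
    intro k a b h
    rw [PySem.List.enumerate_cons]
    simp only [List.foldl_cons]
    have hstep : InvAB (k + 1) (stepA0 a k v) (runStep b (k, v)) := by
      obtain ⟨eP, eL, tP, tL, sc⟩ := a
      obtain ⟨runs, st⟩ := b
      obtain ⟨hbest, hst⟩ := h
      cases v with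
      | false =>
        cases st with
        | none =>
          obtain ⟨hsc, htL⟩ := hst
          subst hsc htL
          rw [stepA0_false_start, runStep_false]
          exact ⟨hbest, rfl, rfl, by simp⟩
        | some s =>
          obtain ⟨hsc, htP, htL⟩ := hst
          subst hsc htP htL
          rw [stepA0_false_mid, runStep_false]
          exact ⟨hbest, rfl, rfl, by simp; ring⟩
      | true =>
        cases st with
        | none =>
          obtain ⟨hsc, htL⟩ := hst
          subst hsc htL
          have h0 : 0 ≤ eL := by
            have := bestStep_snd_nonneg runs ((0 : Int), (0 : Int)) (le_refl 0)
            rw [← hbest] at this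
            exact this
          rw [stepA0_true, if_neg (by omega), runStep_true_none]
          exact ⟨hbest, rfl, rfl⟩
        | some s =>
          obtain ⟨hsc, htP, htL⟩ := hst
          subst hsc htP htL
          rw [stepA0_true, runStep_true_some]
          by_cases hc : eL < k - tP
          · rw [if_pos hc]
            refine ⟨?_, rfl, rfl⟩
            simp only [List.foldl_append, List.foldl_cons, List.foldl_nil, ← hbest, bestStep]
            rw [if_pos (by omega)]
          · rw [if_neg hc]
            refine ⟨?_, rfl, rfl⟩
            simp only [List.foldl_append, List.foldl_cons, List.foldl_nil, ← hbest, bestStep]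
            rw [if_neg (by omega)]
    have := ih (k + 1) _ _ hstep
    simp only [List.length_cons]
    have heq : k + ((vs.length + 1 : Nat) : Int) = (k + 1) + (vs.length : Int) := by
      push_cast; ring
    rw [heq]
    exact this

lemma placePersonStep_eq_stepA0 (n : Int) (st : Int × Int × Int × Int × Bool)
    (i : Int) (v : Bool) (h : i ≠ n - 1) : placePersonStep n st i v = stepA0 st i v := by
  obtain ⟨eP, eL, tP, tL, sc⟩ := st
  have hi : (i == n - 1) = false := by simp [h]
  simp only [placePersonStep, stepA0, hi, Bool.and_false, Bool.false_eq_true, if_false]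

lemma placePersonStep_true (n eP eL tP tL i : Int) (sc : Bool) :
    placePersonStep n (eP, eL, tP, tL, sc) i true
      = (if eL < tL then (tP, tL, tP, (0 : Int), true) else (eP, eL, tP, (0 : Int), true)) := by
  simp only [placePersonStep]
  simp only [show (true == false) = false by rfl, Bool.false_and, Bool.false_eq_true, if_false]
  split_ifs <;> simp_all

lemma placePersonStep_false_start (n eP eL tP i : Int) (h : i = n - 1) :
    placePersonStep n (eP, eL, tP, 0, true) i false
      = (if eL < 1 then (i, 1, i, 1, false) else (eP, eL, i, 1, false)) := by
  subst h
  simp only [placePersonStep]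
  simp only [show (false == false) = true by rfl, show (true == true) = true by rfl,
    Bool.true_and, Bool.and_true, if_true, beq_self_eq_true, zero_add]

lemma placePersonStep_false_mid (n eP eL tP tL i : Int) (h : i = n - 1) :
    placePersonStep n (eP, eL, tP, tL, false) i false
      = (if eL < tL + 1 then (tP, tL + 1, tP, tL + 1, false) else (eP, eL, tP, tL + 1, false)) := by
  subst h
  simp only [placePersonStep]
  simp only [show (false == false) = true by rfl, show (false == true) = false by rfl,
    Bool.and_true, Bool.and_false, Bool.false_eq_true, if_false, if_true, beq_self_eq_true]

-- the two tail formulas agree (A's eL == 1 branch coincides with its odd branch)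
lemma final_formula (eP eL : Int) (h0 : 0 ≤ eL) :
    (if eL == 1 then eP
     else if PySem.Int.mod eL 2 == 0 then eP + PySem.Int.floordiv eL 2 - 1
     else eP + PySem.Int.floordiv eL 2)
      = eP + PySem.Int.floordiv eL 2 - (if PySem.Int.mod eL 2 == 0 then 1 else 0) := by
  have hm : PySem.Int.mod eL 2 = eL % 2 := by
    exact PySem.Int.mod_eq_emod_of_pos (by norm_num)
  have hd : PySem.Int.floordiv eL 2 = eL / 2 := by
    exact PySem.Int.floordiv_eq_ediv_of_pos (by norm_num)
  rw [hm, hd]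
  by_cases h1 : eL = 1
  · subst h1; norm_num
  · simp only [show (eL == 1) = false by simp [h1], Bool.false_eq_true, if_false]
    split_ifs <;> ring

-- ===== VERDICT (by name: the statement is the Claim_ definition above) =====
theorem placePerson_spec : Claim_equal_placePerson := by
  intro xs _ hpre
  unfold Spec_placePerson
  obtain ⟨ys, y, rfl⟩ : ∃ ys y, xs = ys ++ [y] := by
    rcases List.eq_nil_or_concat xs with h | ⟨l, b, h⟩
    · exact absurd h hpre
    · exact ⟨l, b, by simpa [List.concat_eq_append] using h⟩
  simp only [placePerson, placePerson_alt]
  rw [foldl_pyRange_getD_enumerate, enumerate_append_singleton, List.foldl_append,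
      List.foldl_append]
  simp only [List.foldl_cons, List.foldl_nil, zero_add]
  rw [PySem.List.foldl_congr_mem _ _ (fun st p => stepA0 st p.1 p.2) _ ?_]
  swap
  · intro acc p hp
    have hb := enumerate_fst_bound ys 0 p hp
    refine placePersonStep_eq_stepA0 _ acc p.1 p.2 ?_
    simp only [List.length_append, List.length_cons, List.length_nil]
    push_cast
    omega
  have hinv := sim ys 0 (0, 0, 0, 0, true) ([], none) ⟨rfl, rfl, rfl⟩
  rw [zero_add] at hinv
  set sA := (PySem.List.enumerate ys).foldl (fun st p => stepA0 st p.1 p.2)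
      ((0 : Int), (0 : Int), (0 : Int), (0 : Int), true) with hsA
  set sB := (PySem.List.enumerate ys).foldl runStep ([], none) with hsB
  obtain ⟨eP, eL, tP, tL, sc⟩ := sA
  obtain ⟨runs, st⟩ := sB
  obtain ⟨hbest, hst⟩ := hinv
  have h0 : 0 ≤ eL := by
    have := bestStep_snd_nonneg runs ((0 : Int), (0 : Int)) (le_refl 0)
    rw [← hbest] at this
    exact this
  have hn : ((ys ++ [y]).length : Int) - 1 = (ys.length : Int) := by
    simp only [List.length_append, List.length_cons, List.length_nil]
    push_cast
    ring
  cases y with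
  | true =>
    cases st with
    | none =>
      obtain ⟨hsc, htL⟩ := hst
      subst hsc htL
      rw [placePersonStep_true, if_neg (show ¬ eL < (0 : Int) by omega), runStep_true_none]
      simp only [← hbest]
      exact final_formula eP eL h0
    | some s =>
      obtain ⟨hsc, htP, htL⟩ := hst
      subst hsc htP htL
      rw [placePersonStep_true, runStep_true_some]
      simp only [List.foldl_append, List.foldl_cons, List.foldl_nil, ← hbest, bestStep,
        gt_iff_lt]
      by_cases hc : eL < (ys.length : Int) - tP
      · rw [if_pos hc, if_pos hc]
        exact final_formula tP ((ys.length : Int) - tP) (by omega)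
      · rw [if_neg hc, if_neg hc]
        exact final_formula eP eL h0
  | false =>
    cases st with
    | none =>
      obtain ⟨hsc, htL⟩ := hst
      subst hsc htL
      rw [placePersonStep_false_start _ _ _ _ _ hn.symm, runStep_false]
      simp only [Option.getD_none]
      have hL : ((ys ++ [false]).length : Int) - (ys.length : Int) = 1 := by
        simp only [List.length_append, List.length_cons, List.length_nil]
        push_cast
        ring
      simp only [List.foldl_append, List.foldl_cons, List.foldl_nil, ← hbest, bestStep, hL,
        gt_iff_lt]
      by_cases hc : eL < (1 : Int)
      · rw [if_pos hc, if_pos hc]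
        exact final_formula (ys.length : Int) 1 (by omega)
      · rw [if_neg hc, if_neg hc]
        exact final_formula eP eL h0
    | some s =>
      obtain ⟨hsc, htP, htL⟩ := hst
      subst hsc htP htL
      rw [placePersonStep_false_mid _ _ _ _ _ _ hn.symm, runStep_false]
      simp only [Option.getD_some]
      have hL : ((ys ++ [false]).length : Int) - tP = (ys.length : Int) - tP + 1 := by
        simp only [List.length_append, List.length_cons, List.length_nil]
        push_cast
        ring
      simp only [List.foldl_append, List.foldl_cons, List.foldl_nil, ← hbest, bestStep, hL,
        gt_iff_lt]
      by_cases hc : eL < (ys.length : Int) - tP + 1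
      · rw [if_pos hc, if_pos hc]
        exact final_formula tP ((ys.length : Int) - tP + 1) (by omega)
      · rw [if_neg hc, if_neg hc]
        exact final_formula eP eL h0
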